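-- pv_equiv track=rewrite | github.com/Jumitti/TFinder | beta/streamlit-devbuilt/pages/2_🔎_Binding_Sites_Finder.py | generate_iupac_variants
-- ===== SOURCE A (Python) =====
-- def generate_iupac_variants(sequence):
--     iupac_codes = {
--         "R": ["A", "G"],
--         "Y": ["C", "T"],
--         "M": ["A", "C"],
--         "K": ["G", "T"],
--         "W": ["A", "T"],
--         "S": ["C", "G"],
--         "B": ["C", "G", "T"],
--         "D": ["A", "G", "T"],
--         "H": ["A", "C", "T"],
--         "V": ["A", "C", "G"],
--         "N": ["A", "C", "G", "T"]
--     }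
--
--     sequences = [sequence]
--     for i, base in enumerate(sequence):
--         if base.upper() in iupac_codes:
--             new_sequences = []
--             for seq in sequences:
--                 for alternative in iupac_codes[base.upper()]:
--                     new_sequence = seq[:i] + alternative + seq[i + 1:]
--                     new_sequences.append(new_sequence)
--             sequences = new_sequences
--
--     return sequences
-- ===== SOURCE B (Python) =====
-- from itertools import product
--
--
-- def generate_iupac_variants(sequence):
--     iupac_codes = {
--         "R": ["A", "G"],
--         "Y": ["C", "T"],
--         "M": ["A", "C"],
--         "K": ["G", "T"],
--         "W": ["A", "T"],
--         "S": ["C", "G"],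
--         "B": ["C", "G", "T"],
--         "D": ["A", "G", "T"],
--         "H": ["A", "C", "T"],
--         "V": ["A", "C", "G"],
--         "N": ["A", "C", "G", "T"]
--     }
--     pools = [iupac_codes.get(base.upper(), [base]) for base in sequence]
--     return ["".join(choice) for choice in product(*pools)]
-- ===== Notes on version B (the rewrite author's own statement) =====
-- stated objective: idiomatic
-- what changed: Instead of repeatedly splicing every current variant (seq[:i]+alt+seq[i+1:]) at each ambiguous position, B builds a per-position choice pool once and emits each variant with a single itertools.product + join pass.
import Mathlib
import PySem

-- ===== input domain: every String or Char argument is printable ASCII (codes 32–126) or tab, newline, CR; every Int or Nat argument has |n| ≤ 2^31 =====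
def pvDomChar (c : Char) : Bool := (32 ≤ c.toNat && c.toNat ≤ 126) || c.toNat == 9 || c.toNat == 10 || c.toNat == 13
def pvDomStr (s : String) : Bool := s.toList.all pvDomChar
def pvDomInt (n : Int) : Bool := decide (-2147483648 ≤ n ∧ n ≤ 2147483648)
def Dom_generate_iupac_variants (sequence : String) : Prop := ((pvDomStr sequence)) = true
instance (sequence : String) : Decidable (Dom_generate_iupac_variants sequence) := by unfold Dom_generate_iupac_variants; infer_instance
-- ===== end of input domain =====

-- B replaces A's repeated seq[:i]+alt+seq[i+1:] splicing of every variant at every ambiguous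
-- position by per-position choice pools expanded once with itertools.product and joined
-- (objective: idiomatic; the output size dominates, so the cost is the same).

-- ===== PORT A =====
-- the dict literal iupac_codes: 11 distinct single-character keys, ported as an association
-- list keyed by that character (lookup = first match, as for a Python dict literal)
def pvIupac : List (Char × List (List Char)) :=
  [('R', [['A'], ['G']]),
   ('Y', [['C'], ['T']]),
   ('M', [['A'], ['C']]),
   ('K', [['G'], ['T']]),
   ('W', [['A'], ['T']]),
   ('S', [['C'], ['G']]),
   ('B', [['C'], ['G'], ['T']]),
   ('D', [['A'], ['G'], ['T']]),
   ('H', [['A'], ['C'], ['T']]),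
   ('V', [['A'], ['C'], ['G']]),
   ('N', [['A'], ['C'], ['G'], ['T']])]

-- the 'for i, base in enumerate(sequence)' loop; 'base.upper()' on a one-character string is
-- PySem.Chars.upperChar; 'if base.upper() in iupac_codes … iupac_codes[base.upper()]' is the
-- match on the lookup; the two inner loops building new_sequences are the flatMap/map
def pvLoopA : List (Int × Char) → List (List Char) → List (List Char)
  | [], sequences => sequences
  | (i, base) :: rest, sequences =>
      pvLoopA rest
        (match pvIupac.lookup (PySem.Chars.upperChar base) with
         | some alts =>
             sequences.flatMap (fun seq =>
               alts.map (fun alternative =>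
                 PySem.List.slice seq none (some i) ++ alternative ++
                   PySem.List.slice seq (some (i + 1)) none))
         | none => sequences)

def generate_iupac_variants (sequence : String) : List String :=
  (pvLoopA (PySem.List.enumerate sequence.toList 0) [sequence.toList]).map String.ofList

-- ===== PORT B =====
-- iupac_codes.get(base.upper(), [base])
def pvPoolOf (base : Char) : List (List Char) :=
  (pvIupac.lookup (PySem.Chars.upperChar base)).getD [[base]]

-- itertools.product(*pools): leftmost pool varies slowest
def pvProduct : List (List (List Char)) → List (List (List Char))
  | [] => [[]]
  | pool :: rest => pool.flatMap (fun x => (pvProduct rest).map (x :: ·))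

def generate_iupac_variants_alt (sequence : String) : List String :=
  (pvProduct (sequence.toList.map pvPoolOf)).map (fun choice => String.ofList choice.flatten)

-- ===== PRECONDITION & SPEC =====
def Spec_generate_iupac_variants (sequence : String) (out : List String) : Prop := out = generate_iupac_variants_alt sequence
instance (sequence : String) (out : List String) : Decidable (Spec_generate_iupac_variants sequence out) := by unfold Spec_generate_iupac_variants; infer_instance

-- ===== CLAIM (what is proved, stated in full; the proofs are below) =====
def Claim_equal_generate_iupac_variants : Prop := ∀ (sequence : String), Dom_generate_iupac_variants sequence → Spec_generate_iupac_variants sequence (generate_iupac_variants sequence)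

-- ===== LEMMAS AND PROOFS =====

-- every alternative stored in the table is a single character
lemma pvIupac_lookup_len {k : Char} {alts : List (List Char)}
    (h : pvIupac.lookup k = some alts) : ∀ a ∈ alts, a.length = 1 := by
  simp only [pvIupac, List.lookup] at h
  repeat' split at h
  all_goals simp_all
  all_goals (rw [← h]; decide)

lemma pvPoolOf_len (c : Char) : ∀ a ∈ pvPoolOf c, a.length = 1 := by
  unfold pvPoolOf
  cases h : pvIupac.lookup (PySem.Chars.upperChar c) with
  | none => simp
  | some alts => simpa using pvIupac_lookup_len h

-- every member of the product of the pools of l flattens to a string of l's length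
lemma pvProduct_flatten_len (l : List Char) :
    ∀ p ∈ pvProduct (l.map pvPoolOf), p.flatten.length = l.length := by
  induction l with
  | nil => simp [pvProduct]
  | cons c l ih =>
      intro p hp
      simp only [List.map_cons, pvProduct, List.mem_flatMap, List.mem_map] at hp
      obtain ⟨x, hx, q, hq, rfl⟩ := hp
      simp only [List.flatten_cons, List.length_append, pvPoolOf_len c x hx, ih q hq,
        List.length_cons]
      omega

lemma pvProduct_append_singleton (l : List (List (List Char))) (x : List (List Char)) :
    pvProduct (l ++ [x]) = (pvProduct l).flatMap (fun p => x.map (fun a => p ++ [a])) := by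
  induction l with
  | nil => simp [pvProduct, List.map_eq_flatMap]
  | cons y l ih =>
      simp [pvProduct, ih, List.map_flatMap, List.flatMap_assoc, List.map_map,
        List.flatMap_map, Function.comp_def]

-- the loop invariant: having processed the prefix 'pre', the variant list is the product of
-- pre's pools, each followed by the untouched suffix
lemma pvLoopA_spec (suf pre : List Char) :
    pvLoopA (PySem.List.enumerate suf (pre.length : Int))
        ((pvProduct (pre.map pvPoolOf)).map (fun p => p.flatten ++ suf))
      = (pvProduct ((pre ++ suf).map pvPoolOf)).map (fun p => p.flatten) := by
  induction suf generalizing pre with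
  | nil => simp [PySem.List.enumerate, pvLoopA]
  | cons base rest ih =>
      rw [PySem.List.enumerate_cons, pvLoopA]
      have hlen : (pre.length : Int) + 1 = (((pre ++ [base]).length : Nat) : Int) := by
        simp only [List.length_append, List.length_cons, List.length_nil]; push_cast; omega
      have hprod : pvProduct ((pre ++ [base]).map pvPoolOf)
          = (pvProduct (pre.map pvPoolOf)).flatMap
              (fun p => (pvPoolOf base).map (fun a => p ++ [a])) := by
        rw [List.map_append, List.map_singleton, pvProduct_append_singleton]
      have hgoal : ∀ S, S = (pvProduct ((pre ++ [base]).map pvPoolOf)).map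
            (fun p => p.flatten ++ rest) →
          pvLoopA (PySem.List.enumerate rest ((pre.length : Int) + 1)) S
            = (pvProduct ((pre ++ base :: rest).map pvPoolOf)).map (fun p => p.flatten) := by
        intro S hS
        rw [hS, hlen, ih (pre ++ [base])]
        simp
      cases h : pvIupac.lookup (PySem.Chars.upperChar base) with
      | some alts =>
          apply hgoal
          show (List.map (fun p => p.flatten ++ base :: rest)
              (pvProduct (List.map pvPoolOf pre))).flatMap
              (fun seq => alts.map (fun alternative =>
                PySem.List.slice seq none (some (pre.length : Int)) ++ alternative ++
                  PySem.List.slice seq (some ((pre.length : Int) + 1)) none)) = _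
          have hpool : pvPoolOf base = alts := by simp [pvPoolOf, h]
          rw [hprod, hpool, List.map_flatMap, List.flatMap_map]
          apply List.flatMap_congr
          intro p hp
          have hplen : p.flatten.length = pre.length := pvProduct_flatten_len pre p hp
          have h1 : PySem.List.slice (p.flatten ++ base :: rest) none (some (pre.length : Int))
              = p.flatten := by
            rw [PySem.List.slice_to_natCast, ← hplen, List.take_left]
          have h2 : PySem.List.slice (p.flatten ++ base :: rest)
              (some ((pre.length : Int) + 1)) none = rest := by
            have hc : ((pre.length : Int) + 1) = (((pre.length + 1 : Nat)) : Int) := by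
              push_cast; ring
            rw [hc, PySem.List.slice_from_natCast, ← hplen,
              show p.flatten ++ base :: rest = (p.flatten ++ [base]) ++ rest by simp,
              show p.flatten.length + 1 = (p.flatten ++ [base]).length by simp,
              List.drop_left]
          simp only [Function.comp_def, List.map_map, h1, h2]
          apply List.map_congr_left
          intro a _
          simp
      | none =>
          apply hgoal
          show List.map (fun p => p.flatten ++ base :: rest)
              (pvProduct (List.map pvPoolOf pre)) = _
          have hpool : pvPoolOf base = [[base]] := by simp [pvPoolOf, h]
          rw [hprod, hpool]
          simp only [List.map_flatMap, List.map_singleton,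
            List.flatten_append, List.flatten_cons, List.flatten_nil, List.append_nil,
            List.append_assoc, List.singleton_append]
          rw [List.map_eq_flatMap]

-- ===== VERDICT (by name: the statement is the Claim_ definition above) =====
theorem generate_iupac_variants_spec : Claim_equal_generate_iupac_variants := by
  intro sequence _
  show _ = _
  unfold generate_iupac_variants generate_iupac_variants_alt
  have h := pvLoopA_spec sequence.toList []
  simp only [List.map_nil, pvProduct, List.map_cons, List.flatten_nil, List.nil_append,
    List.length_nil, Nat.cast_zero] at h
  rw [h, List.map_map]
  rfl
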